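-- pv_equiv track=rewrite | github.com/passprotectorpro/passprotectorpro | app.py | has_leet_speak_substitutions
-- ===== SOURCE A (Python) =====
-- def has_leet_speak_substitutions(password):
--     leet_substitutions = {
--         'a': ['4', '@'],
--         'b': ['8'],
--         'e': ['3'],
--         'g': ['9', '6'],
--         'i': ['1', '!', '|'],
--         'l': ['1', '|', '!'],
--         'o': ['0'],
--         's': ['$', '5'],
--         't': ['7', '+']
--     }
--
--     for char, substitutions in leet_substitutions.items():
--         if any(sub in password.lower() for sub in substitutions):
--             return 1
--
--     return 0
-- ===== SOURCE B (Python) =====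
-- LEET_CHARS = frozenset("4@8396 1!|0$5 7+".replace(" ", ""))
--
-- def has_leet_speak_substitutions(password):
--     return 1 if any(c in LEET_CHARS for c in password.lower()) else 0
-- ===== Notes on version B (the rewrite author's own statement) =====
-- stated objective: idiomatic
-- what changed: Transposed the traversal: instead of looping over nine substitution groups and running a substring search of the whole lowered password for each candidate character, B flattens the substitutions into one precomputed character set and makes a single pass over the password testing each character for membership.
import Mathlib
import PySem

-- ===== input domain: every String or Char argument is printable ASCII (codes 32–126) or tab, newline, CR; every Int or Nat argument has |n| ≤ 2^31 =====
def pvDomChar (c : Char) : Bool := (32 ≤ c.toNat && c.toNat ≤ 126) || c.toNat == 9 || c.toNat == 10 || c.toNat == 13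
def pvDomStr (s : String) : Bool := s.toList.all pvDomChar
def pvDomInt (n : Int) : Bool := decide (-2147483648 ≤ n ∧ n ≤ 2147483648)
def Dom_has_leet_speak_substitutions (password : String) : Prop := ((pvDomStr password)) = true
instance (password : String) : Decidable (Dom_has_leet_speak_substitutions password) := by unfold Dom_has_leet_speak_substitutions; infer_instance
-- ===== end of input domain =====

-- B replaces A's nine substring searches over the lowered password by one pass over the
-- password's characters against a flat precomputed set of all substitution characters.

-- ===== PORT A =====
-- the dict literal, as an association list in insertion order
def hlsLeetSubstitutions : List (String × List String) :=
  [("a", ["4", "@"]), ("b", ["8"]), ("e", ["3"]), ("g", ["9", "6"]),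
   ("i", ["1", "!", "|"]), ("l", ["1", "|", "!"]), ("o", ["0"]),
   ("s", ["$", "5"]), ("t", ["7", "+"])]

-- the 'for char, substitutions in …: if any(sub in password.lower() …): return 1' loop
def hlsLoop (password : String) : List (String × List String) → Int
  | [] => 0
  | (_, subs) :: rest =>
      if subs.any (fun sub => PySem.Str.isIn sub (PySem.Str.lower password)) then 1
      else hlsLoop password rest

def has_leet_speak_substitutions (password : String) : Int :=
  hlsLoop password hlsLeetSubstitutions

-- ===== PORT B =====
-- LEET_CHARS = frozenset("4@8396 1!|0$5 7+".replace(" ", "")) — the 14 distinct substitution characters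
def hlsLeetChars : List Char := ['4', '@', '8', '3', '9', '6', '1', '!', '|', '0', '$', '5', '7', '+']

-- return 1 if any(c in LEET_CHARS for c in password.lower()) else 0
def has_leet_speak_substitutions_alt (password : String) : Int :=
  if (PySem.Str.lower password).toList.any (fun c => hlsLeetChars.contains c) then 1 else 0

-- ===== PRECONDITION & SPEC =====
def Spec_has_leet_speak_substitutions (password : String) (out : Int) : Prop := out = has_leet_speak_substitutions_alt password
instance (password : String) (out : Int) : Decidable (Spec_has_leet_speak_substitutions password out) := by unfold Spec_has_leet_speak_substitutions; infer_instance

-- ===== CLAIM (what is proved, stated in full; the proofs are below) =====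
def Claim_equal_has_leet_speak_substitutions : Prop := ∀ (password : String), Dom_has_leet_speak_substitutions password → Spec_has_leet_speak_substitutions password (has_leet_speak_substitutions password)

-- ===== LEMMAS AND PROOFS =====

-- a single-character substring test is character membership
theorem hls_single_isIn (c : Char) (s : List Char) :
    PySem.Chars.isIn [c] s = s.contains c := by
  cases hb : s.contains c
  · exact (PySem.Chars.isIn_eq_false_iff _ _).mpr
      (fun h => by simp_all [List.singleton_infix_iff])
  · exact (PySem.Chars.isIn_iff_infix _ _).mpr
      ((List.singleton_infix_iff c s).mpr (by simp_all))

-- the one-pass membership test over the flat set, flattened into the 14 individual tests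
theorem hls_any_flat (L : List Char) :
    L.any (fun c => hlsLeetChars.contains c) =
      (L.contains '4' || L.contains '@' || L.contains '8' || L.contains '3' ||
       L.contains '9' || L.contains '6' || L.contains '1' || L.contains '!' ||
       L.contains '|' || L.contains '0' || L.contains '$' || L.contains '5' ||
       L.contains '7' || L.contains '+') := by
  rw [Bool.eq_iff_iff]
  simp [hlsLeetChars, List.any_eq_true]
  constructor
  · rintro ⟨x, hxL, h⟩
    rcases h with rfl | rfl | rfl | rfl | rfl | rfl | rfl | rfl | rfl | rfl | rfl | rfl | rfl | rfl <;> tauto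
  · rintro (((((((((((((h | h) | h) | h) | h) | h) | h) | h) | h) | h) | h) | h) | h) | h) <;> exact ⟨_, h, by tauto⟩

-- ===== VERDICT (by name: the statement is the Claim_ definition above) =====
theorem has_leet_speak_substitutions_spec : Claim_equal_has_leet_speak_substitutions := by
  intro password _
  unfold Spec_has_leet_speak_substitutions has_leet_speak_substitutions
    has_leet_speak_substitutions_alt hlsLeetSubstitutions
  simp only [hlsLoop, List.any_cons, List.any_nil,
    PySem.Str.isIn_eq, PySem.Str.toList_lower,
    show ("4" : String).toList = ['4'] from rfl, show ("@" : String).toList = ['@'] from rfl,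
    show ("8" : String).toList = ['8'] from rfl, show ("3" : String).toList = ['3'] from rfl,
    show ("9" : String).toList = ['9'] from rfl, show ("6" : String).toList = ['6'] from rfl,
    show ("1" : String).toList = ['1'] from rfl, show ("!" : String).toList = ['!'] from rfl,
    show ("|" : String).toList = ['|'] from rfl, show ("0" : String).toList = ['0'] from rfl,
    show ("$" : String).toList = ['$'] from rfl, show ("5" : String).toList = ['5'] from rfl,
    show ("7" : String).toList = ['7'] from rfl, show ("+" : String).toList = ['+'] from rfl,
    hls_single_isIn]
  rw [hls_any_flat]
  split_ifs <;> simp_all
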